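-- pv_equiv track=rewrite | github.com/bamazap/build-responsively | build.py | assign_positions
-- ===== SOURCE A (Python) =====
-- def assign_positions(widgets, width, height):
--     positions = []
--     x = 0
--     y = 0
--     row_height = 0
--     for widget in widgets:
--         if x + widget['width'] > width:
--             x = 0
--             y += row_height
--             row_height = 0
--         positions.append((x, y))
--         row_height = max(row_height, widget['height'])
--         x += widget['width']
--     return positions
-- ===== SOURCE B (Python) =====
-- def assign_positions(widgets, width, height):
--     # Pass 1: partition widgets into rows (break a row only when it already
--     # holds a widget and the next one would overflow the width).
--     rows = []
--     cur = []
--     x = 0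
--     for widget in widgets:
--         w = widget['width']
--         if cur and x + w > width:
--             rows.append(cur)
--             cur = []
--             x = 0
--         cur.append(widget)
--         x += w
--     if cur:
--         rows.append(cur)
--     # Pass 2: lay rows out top to bottom; a row's height is the max of its
--     # widgets' heights (at least 0).
--     positions = []
--     y = 0
--     for row in rows:
--         x = 0
--         for widget in row:
--             positions.append((x, y))
--             x += widget['width']
--         y += max([0] + [widget['height'] for widget in row])
--     return positions
-- ===== Notes on version B (the rewrite author's own statement) =====
-- stated objective: alternative
-- what changed: Replaces A's single loop with mutable running (x, y, row_height) state by a two-pass decomposition: first partition the widgets into rows with the overflow rule, then lay the rows out top to bottom, computing each row's height as a max over the finished row.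
import Mathlib
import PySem

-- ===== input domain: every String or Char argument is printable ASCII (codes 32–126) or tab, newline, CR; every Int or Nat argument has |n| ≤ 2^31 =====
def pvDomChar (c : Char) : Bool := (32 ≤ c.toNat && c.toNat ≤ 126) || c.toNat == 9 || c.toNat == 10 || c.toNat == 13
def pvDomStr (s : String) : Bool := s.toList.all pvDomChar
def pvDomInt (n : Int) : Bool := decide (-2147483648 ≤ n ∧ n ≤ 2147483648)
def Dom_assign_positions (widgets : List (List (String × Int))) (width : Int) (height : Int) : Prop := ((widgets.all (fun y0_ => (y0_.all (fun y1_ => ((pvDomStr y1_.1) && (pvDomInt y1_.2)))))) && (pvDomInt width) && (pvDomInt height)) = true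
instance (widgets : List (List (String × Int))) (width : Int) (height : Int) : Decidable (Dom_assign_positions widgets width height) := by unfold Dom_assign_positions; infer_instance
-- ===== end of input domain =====

-- B is a two-pass row decomposition (partition into rows, then place rows) instead of A's
-- single loop with running (x, y, row_height) state; same cost, different structure.

-- widget['k'] on the association list (first match); the .getD 0 default is unreachable under Pre_
def pvLookup (wd : List (String × Int)) (k : String) : Int :=
  ((wd.find? (fun p => p.1 == k)).map Prod.snd).getD 0

def pvW (wd : List (String × Int)) : Int := pvLookup wd "width"
def pvH (wd : List (String × Int)) : Int := pvLookup wd "height"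

-- ===== PORT A =====
-- A's loop, step for step: optional row break, append (x, y), update row_height and x
def pvLoopA (width : Int) : List (List (String × Int)) → List (Int × Int) → Int → Int → Int → List (Int × Int)
  | [], positions, _, _, _ => positions
  | wd :: rest, positions, x, y, rh =>
    if x + pvW wd > width then
      -- row break (x := 0; y += row_height; row_height := 0), then the common three statements
      pvLoopA width rest (positions ++ [(0, y + rh)]) (0 + pvW wd) (y + rh) (max 0 (pvH wd))
    else
      pvLoopA width rest (positions ++ [(x, y)]) (x + pvW wd) y (max rh (pvH wd))

def assign_positions (widgets : List (List (String × Int))) (width : Int) (height : Int) : List (Int × Int) :=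
  pvLoopA width widgets [] 0 0 0

-- ===== PORT B =====
-- pass 1: partition into rows, breaking only when the current row is nonempty and would overflow
def pvRows (width : Int) : List (List (String × Int)) → List (List (String × Int)) → Int → List (List (List (String × Int)))
  | [], cur, _ => if cur.isEmpty then [] else [cur]
  | wd :: rest, cur, x =>
    if !cur.isEmpty && x + pvW wd > width then
      cur :: pvRows width rest [wd] (pvW wd)
    else
      pvRows width rest (cur ++ [wd]) (x + pvW wd)

-- inner loop of pass 2: positions of one row from running x at height y
def pvRowXs : List (List (String × Int)) → Int → Int → List (Int × Int)
  | [], _, _ => []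
  | wd :: rest, x, y => (x, y) :: pvRowXs rest (x + pvW wd) y

-- max([0] + heights)
def pvMaxH (row : List (List (String × Int))) : Int :=
  row.foldl (fun m wd => max m (pvH wd)) 0

-- pass 2: rows top to bottom, advancing y by each row's height
def pvPlace (width : Int) : List (List (List (String × Int))) → Int → List (Int × Int)
  | [], _ => []
  | row :: rest, y => pvRowXs row 0 y ++ pvPlace width rest (y + pvMaxH row)

def assign_positions_alt (widgets : List (List (String × Int))) (width : Int) (height : Int) : List (Int × Int) :=
  pvPlace width (pvRows width widgets [] 0) 0

-- ===== PRECONDITION & SPEC =====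
-- Pre_ excludes widgets missing a 'width' or 'height' key, on which the Python raises KeyError.
def Pre_assign_positions (widgets : List (List (String × Int))) (width : Int) (height : Int) : Prop :=
  ∀ wd ∈ widgets, ((wd.find? (fun p => p.1 == "width")).isSome = true ∧ (wd.find? (fun p => p.1 == "height")).isSome = true)
instance (widgets : List (List (String × Int))) (width : Int) (height : Int) : Decidable (Pre_assign_positions widgets width height) := by unfold Pre_assign_positions; infer_instance

def pvWitness_assign_positions : (List (List (String × Int))) × Int × Int :=
  ([[("width", 3), ("height", 2)], [("width", 4), ("height", 1)], [("width", 2), ("height", 5)]], 5, 10)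

def Spec_assign_positions (widgets : List (List (String × Int))) (width : Int) (height : Int) (out : List (Int × Int)) : Prop := out = assign_positions_alt widgets width height
instance (widgets : List (List (String × Int))) (width : Int) (height : Int) (out : List (Int × Int)) : Decidable (Spec_assign_positions widgets width height out) := by unfold Spec_assign_positions; infer_instance

-- ===== CLAIM (what is proved, stated in full; the proofs are below) =====
def Claim_equal_assign_positions : Prop := ∀ (widgets : List (List (String × Int))) (width : Int) (height : Int), Dom_assign_positions widgets width height → Pre_assign_positions widgets width height → Spec_assign_positions widgets width height (assign_positions widgets width height)

-- ===== LEMMAS AND PROOFS =====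

def pvSumW (row : List (List (String × Int))) : Int := (row.map pvW).sum

theorem pv_drop_len_append {α : Type} (a t : List α) (n : Nat) (h : a.length = n) :
    (a ++ t).drop n = t := by
  subst h; exact List.drop_left

theorem pvRowXs_append (a b : List (List (String × Int))) (x y : Int) :
    pvRowXs (a ++ b) x y = pvRowXs a x y ++ pvRowXs b (x + pvSumW a) y := by
  induction a generalizing x with
  | nil => simp [pvRowXs, pvSumW]
  | cons wd rest ih =>
      simp only [List.cons_append, pvRowXs, ih, pvSumW, List.map_cons, List.sum_cons]
      ring_nf

theorem pvRowXs_length (a : List (List (String × Int))) (x y : Int) :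
    (pvRowXs a x y).length = a.length := by
  induction a generalizing x with
  | nil => rfl
  | cons wd rest ih => simp [pvRowXs, ih]

theorem pvMaxH_append (a : List (List (String × Int))) (wd : List (String × Int)) :
    pvMaxH (a ++ [wd]) = max (pvMaxH a) (pvH wd) := by
  simp [pvMaxH, List.foldl_append]

theorem pvSumW_append (a : List (List (String × Int))) (wd : List (String × Int)) :
    pvSumW (a ++ [wd]) = pvSumW a + pvW wd := by
  simp [pvSumW]

-- pvRows on a nonempty current row returns that row (possibly extended) first
theorem pvRows_structure (width : Int) (ws : List (List (String × Int)))
    (cur : List (List (String × Int))) (x : Int) (h : cur ≠ []) :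
    ∃ ext rows', pvRows width ws cur x = (cur ++ ext) :: rows' := by
  induction ws generalizing cur x with
  | nil =>
      refine ⟨[], [], ?_⟩
      simp [pvRows, List.isEmpty_iff, h]
  | cons wd rest ih =>
      by_cases hb : (!cur.isEmpty && decide (x + pvW wd > width)) = true
      · refine ⟨[], pvRows width rest [wd] (pvW wd), ?_⟩
        simp only [pvRows]
        rw [if_pos hb, List.append_nil]
      · obtain ⟨ext, rows', heq⟩ := ih (cur ++ [wd]) (x + pvW wd) (by simp)
        refine ⟨[wd] ++ ext, rows', ?_⟩
        simp only [pvRows]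
        rw [if_neg hb, heq, List.append_assoc]

-- head position of a placement starting a nonempty current row
theorem pvPlace_head (width : Int) (ws : List (List (String × Int)))
    (cur : List (List (String × Int))) (x y : Int) (h : cur ≠ []) :
    ∃ tail, pvPlace width (pvRows width ws cur x) y = (0, y) :: tail := by
  obtain ⟨ext, rows', heq⟩ := pvRows_structure width ws cur x h
  obtain ⟨c0, ctl, rfl⟩ := List.exists_cons_of_ne_nil h
  exact ⟨pvRowXs (ctl ++ ext) (0 + pvW c0) y ++ pvPlace width rows' (y + pvMaxH ((c0 :: ctl) ++ ext)), by
    rw [heq]; simp [pvPlace, pvRowXs]⟩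

-- main invariant: A's loop from mid-row state (row content cur, x = its width sum,
-- row_height = its running max) equals B's placement with cur's own positions dropped
theorem pvLoop_eq (width : Int) (ws : List (List (String × Int))) :
    ∀ (cur : List (List (String × Int))) (pos : List (Int × Int)) (y : Int),
      pvLoopA width ws pos (pvSumW cur) y (pvMaxH cur) =
        pos ++ (pvPlace width (pvRows width ws cur (pvSumW cur)) y).drop cur.length := by
  induction ws with
  | nil =>
      intro cur pos y
      by_cases h : cur = []
      · subst h; simp [pvLoopA, pvRows, pvPlace]
      · have hR : pvRows width [] cur (pvSumW cur) = [cur] := by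
          simp [pvRows, List.isEmpty_iff, h]
        simp only [pvLoopA, hR, pvPlace, List.append_nil]
        have hnil : (pvRowXs cur 0 y).drop cur.length = [] := by
          rw [← pvRowXs_length cur 0 y, List.drop_length]
        rw [hnil, List.append_nil]
  | cons wd rest ih =>
      intro cur pos y
      have harg : pvW wd = pvSumW [wd] := by simp [pvSumW]
      have hmax1 : max 0 (pvH wd) = pvMaxH [wd] := rfl
      by_cases hb : pvSumW cur + pvW wd > width
      · by_cases hc : cur = []
        · -- A's break fires but is a no-op (x = 0, row_height = 0); B's guard is false
          subst hc
          show pvLoopA width (wd :: rest) pos 0 y 0 =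
            pos ++ (pvPlace width (pvRows width (wd :: rest) [] 0) y).drop 0
          rw [List.drop_zero]
          simp only [pvLoopA]
          rw [if_pos (show (0 : Int) + pvW wd > width by simpa [pvSumW] using hb)]
          rw [add_zero, harg, hmax1, zero_add, ih [wd]]
          have hR : pvRows width (wd :: rest) [] 0 = pvRows width rest [wd] (pvSumW [wd]) := by
            simp only [pvRows]
            rw [if_neg (by simp)]
            simp [harg]
          rw [hR]
          obtain ⟨tail, htail⟩ := pvPlace_head width rest [wd] (pvSumW [wd]) y (by simp)
          rw [htail]
          simp
        · -- the row cur is closed; wd starts a new row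
          simp only [pvLoopA]
          rw [if_pos hb, harg, hmax1, zero_add, ih [wd]]
          have hg : (!cur.isEmpty && decide (pvSumW cur + pvW wd > width)) = true := by
            simp [hc, hb]
          have hR : pvRows width (wd :: rest) cur (pvSumW cur) =
              cur :: pvRows width rest [wd] (pvSumW [wd]) := by
            simp only [pvRows]
            rw [if_pos hg, harg]
          rw [hR]
          simp only [pvPlace]
          rw [pv_drop_len_append _ _ _ (pvRowXs_length cur 0 y)]
          obtain ⟨tail, htail⟩ :=
            pvPlace_head width rest [wd] (pvSumW [wd]) (y + pvMaxH cur) (by simp)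
          rw [htail]
          simp
      · -- no break on either side: wd joins the current row
        simp only [pvLoopA]
        rw [if_neg hb]
        have h1 : pvSumW cur + pvW wd = pvSumW (cur ++ [wd]) := (pvSumW_append cur wd).symm
        have h2 : max (pvMaxH cur) (pvH wd) = pvMaxH (cur ++ [wd]) := (pvMaxH_append cur wd).symm
        rw [h1, h2, ih (cur ++ [wd])]
        have hR : pvRows width (wd :: rest) cur (pvSumW cur) =
            pvRows width rest (cur ++ [wd]) (pvSumW (cur ++ [wd])) := by
          simp only [pvRows]
          rw [if_neg (by simp [hb]), h1]
        rw [hR]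
        obtain ⟨ext, rows', heq⟩ :=
          pvRows_structure width rest (cur ++ [wd]) (pvSumW (cur ++ [wd])) (by simp)
        rw [heq]
        simp only [pvPlace]
        rw [show (cur ++ [wd]) ++ ext = cur ++ ([wd] ++ ext) from by simp,
            pvRowXs_append cur ([wd] ++ ext) 0 y]
        have hrow : pvRowXs ([wd] ++ ext) (0 + pvSumW cur) y =
            (pvSumW cur, y) :: pvRowXs ext (pvSumW cur + pvW wd) y := by
          simp [pvRowXs]
        rw [hrow, List.append_assoc]
        simp [List.drop_append, pvRowXs_length]

-- ===== VERDICT (by name: the statement is the Claim_ definition above) =====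
theorem assign_positions_spec : Claim_equal_assign_positions := by
  intro widgets width height _ _
  show assign_positions widgets width height = assign_positions_alt widgets width height
  have := pvLoop_eq width widgets [] [] 0
  simpa [assign_positions, assign_positions_alt, pvSumW, pvMaxH] using this
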